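-- pv_equiv track=rewrite | github.com/Noble-Mushtak/Advent-of-Code | 2025/day10/solution.py | bfs_on_tools
-- ===== SOURCE A (Python) =====
-- from collections import deque
--
-- def bfs_on_tools(exp, tools):
--     vis = set()
--     bfs_q = deque()
--     bfs_q.append((0,0))
--     vis.add(0)
--     while True:
--         assert len(bfs_q) > 0
--         (v, c) = bfs_q[0]
--         bfs_q.popleft()
--         if v == exp:
--             return c
--         for tool in tools:
--             if v ^ tool not in vis:
--                 bfs_q.append((v ^ tool, c+1))
--                 vis.add(v ^ tool)
-- ===== SOURCE B (Python) =====
-- def bfs_on_tools(exp, tools):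
--     # Subset DP over the tools list instead of a BFS search of the XOR-state graph:
--     # applying a tool twice cancels, so the minimum number of ops is the minimum
--     # size of a subset of tools whose XOR is exp; process each tool exactly once,
--     # keeping dist = {reachable value: min subset size}.
--     dist = {0: 0}
--     for t in tools:
--         nxt = dict(dist)
--         for v, d in dist.items():
--             w = v ^ t
--             nxt[w] = min(dist.get(w, d + 1), d + 1)
--         dist = nxt
--     assert exp in dist
--     return dist[exp]
-- ===== Notes on version B (the rewrite author's own statement) =====
-- stated objective: alternative
-- what changed: Replaces the BFS over the XOR-state graph (queue, visited set, per-node depths) by a subset DP over the tools list: each tool is processed exactly once against a table {value: minimal subset size}, correct because a tool applied twice cancels, so the minimum op count equals the minimum size of a subset of tools XOR-ing to exp; it trades A's early exit on hitting exp for a single pass over the tools, so it can be slower on large inputs.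
import Mathlib
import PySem

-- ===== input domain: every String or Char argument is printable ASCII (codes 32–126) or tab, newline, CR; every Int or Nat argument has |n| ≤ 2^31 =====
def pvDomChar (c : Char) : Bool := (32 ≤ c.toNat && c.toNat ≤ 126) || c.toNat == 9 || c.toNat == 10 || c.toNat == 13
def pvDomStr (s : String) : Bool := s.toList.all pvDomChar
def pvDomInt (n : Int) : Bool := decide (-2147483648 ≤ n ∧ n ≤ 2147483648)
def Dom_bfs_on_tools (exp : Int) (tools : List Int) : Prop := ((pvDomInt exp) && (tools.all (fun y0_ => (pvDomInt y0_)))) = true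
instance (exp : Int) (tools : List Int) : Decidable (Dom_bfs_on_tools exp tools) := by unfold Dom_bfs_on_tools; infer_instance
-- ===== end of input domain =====

-- B replaces A's breadth-first search of the XOR-state graph (queue, visited set, per-node depths)
-- by a subset DP over the tools list: each tool is processed once against a table
-- {value : minimal subset size}, correct because a tool applied twice cancels.

-- ===== PORT A =====
-- `while True` loop of A as fuel recursion; `none` = AssertionError (empty queue) or fuel exhaustion;
-- the fuel 2^len+1 is proved sufficient on Pre_ (the number of dequeues is at most the XOR-span size).
def stepA (exp : Int) (tools : List Int) : Nat → List (Int × Int) → PySem.Set Int → Option Int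
  | 0, _, _ => none
  | fuel + 1, q, vis =>
    match q with
    | [] => none
    | (v, c) :: rest =>
      if v = exp then some c
      else
        let st := tools.foldl
          (fun (st : List (Int × Int) × PySem.Set Int) tool =>
            if PySem.Set.contains st.2 (PySem.Int.bxor v tool) then st
            else (st.1 ++ [(PySem.Int.bxor v tool, c + 1)], PySem.Set.add st.2 (PySem.Int.bxor v tool)))
          (rest, vis)
        stepA exp tools fuel st.1 st.2

def bfs_on_tools (exp : Int) (tools : List Int) : Int :=
  (stepA exp tools (2 ^ tools.length + 1) [(0, 0)] (PySem.Set.add PySem.Set.empty 0)).getD 0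

-- ===== PORT B =====
-- one outer iteration of B: `nxt = dict(dist)` then `for v, d in dist.items(): nxt[w] = min(dist.get(w, d+1), d+1)`
def dpStep (t : Int) (dist : PySem.Dict Int Int) : PySem.Dict Int Int :=
  dist.items.foldl
    (fun nxt vd =>
      nxt.insert (PySem.Int.bxor vd.1 t)
        (min (PySem.Dict.getD dist (PySem.Int.bxor vd.1 t) (vd.2 + 1)) (vd.2 + 1)))
    dist

-- `assert exp in dist; return dist[exp]`: `.getD 0` only materialises the value; Pre_ guarantees `some`
def bfs_on_tools_alt (exp : Int) (tools : List Int) : Int :=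
  (PySem.Dict.get?
      (tools.foldl (fun dist t => dpStep t dist) (PySem.Dict.insert PySem.Dict.empty 0 0))
      exp).getD 0

-- ===== PRECONDITION & SPEC =====
-- the set of values reachable from 0 by XOR-ing tools: the closure of {0} under (· ^ t), t ∈ tools
def xorSpan (tools : List Int) : Finset Int :=
  tools.foldl (fun acc t => acc ∪ acc.image (fun x => PySem.Int.bxor x t)) {0}

-- Pre_ excludes exactly the unreachable targets, on which A's `assert len(bfs_q) > 0` raises
-- AssertionError once the queue empties (B's `assert exp in dist` raises there too).
def Pre_bfs_on_tools (exp : Int) (tools : List Int) : Prop := exp ∈ xorSpan tools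

instance (exp : Int) (tools : List Int) : Decidable (Pre_bfs_on_tools exp tools) := by
  unfold Pre_bfs_on_tools; infer_instance

def pvWitness_bfs_on_tools : Int × List Int := (3, [1, 2])

def Spec_bfs_on_tools (exp : Int) (tools : List Int) (out : Int) : Prop := out = bfs_on_tools_alt exp tools
instance (exp : Int) (tools : List Int) (out : Int) : Decidable (Spec_bfs_on_tools exp tools out) := by
  unfold Spec_bfs_on_tools; infer_instance

-- ===== CLAIM (what is proved, stated in full; the proofs are below) =====
def Claim_equal_bfs_on_tools : Prop := ∀ (exp : Int) (tools : List Int), Dom_bfs_on_tools exp tools → Pre_bfs_on_tools exp tools → Spec_bfs_on_tools exp tools (bfs_on_tools exp tools)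

-- ===== LEMMAS AND PROOFS =====

-- XOR algebra for PySem.Int.bxor
lemma pv_bxor_eq (a b : Int) : PySem.Int.bxor a b = Int.xor a b := by
  cases a with
  | ofNat m =>
    cases b with
    | ofNat n => simp [PySem.Int.bxor, Int.xor]
    | negSucc n => simp [PySem.Int.bxor, Int.xor, Int.negSucc_eq]; omega
  | negSucc m =>
    cases b with
    | ofNat n => simp [PySem.Int.bxor, Int.xor, Int.negSucc_eq]; omega
    | negSucc n =>
      simp [PySem.Int.bxor, Int.xor, Int.negSucc_eq]
      rw [if_neg (by omega), if_neg (by omega)]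

lemma pv_int_xor_assoc (a b c : Int) : Int.xor (Int.xor a b) c = Int.xor a (Int.xor b c) := by
  cases a <;> cases b <;> cases c <;> simp [Int.xor, Nat.xor_assoc]

lemma pv_bxor_assoc (a b c : Int) :
    PySem.Int.bxor (PySem.Int.bxor a b) c = PySem.Int.bxor a (PySem.Int.bxor b c) := by
  simp [pv_bxor_eq, pv_int_xor_assoc]

lemma pv_bxor_cancel (a t : Int) : PySem.Int.bxor (PySem.Int.bxor a t) t = a := by
  rw [pv_bxor_assoc, PySem.Int.bxor_self, PySem.Int.bxor_zero]

lemma pv_bxor_right_comm (a s t : Int) :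
    PySem.Int.bxor (PySem.Int.bxor a s) t = PySem.Int.bxor (PySem.Int.bxor a t) s := by
  rw [pv_bxor_assoc, pv_bxor_assoc, PySem.Int.bxor_comm s t]

lemma pv_contains_eq (s : PySem.Set Int) (x : Int) : PySem.Set.contains s x = decide (x ∈ s) := by
  by_cases h : x ∈ s <;> simp [PySem.Set.contains, h]

-- XOR of a list of tools
def pvXor (s : List Int) : Int := s.foldl (fun a b => PySem.Int.bxor a b) 0

lemma pvXor_foldl (a : Int) (l : List Int) :
    l.foldl (fun x y => PySem.Int.bxor x y) a = PySem.Int.bxor a (pvXor l) := by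
  induction l generalizing a with
  | nil => simp [pvXor, PySem.Int.bxor_zero]
  | cons x l ih =>
    have hx0 : PySem.Int.bxor 0 x = x := by rw [PySem.Int.bxor_comm, PySem.Int.bxor_zero]
    simp only [pvXor, List.foldl_cons, hx0]
    rw [ih (PySem.Int.bxor a x), ih x, pv_bxor_assoc]

lemma pvXor_cons (x : Int) (l : List Int) : pvXor (x :: l) = PySem.Int.bxor x (pvXor l) := by
  have hx0 : PySem.Int.bxor 0 x = x := by rw [PySem.Int.bxor_comm, PySem.Int.bxor_zero]
  simp only [pvXor, List.foldl_cons, hx0]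
  exact pvXor_foldl x l

lemma pvXor_append_singleton (s : List Int) (t : Int) :
    pvXor (s ++ [t]) = PySem.Int.bxor (pvXor s) t := by
  simp [pvXor, List.foldl_append]

-- "exp is the XOR of some length-n sublist of p"
def ReachK (p : List Int) (w : Int) (n : Nat) : Prop :=
  ∃ s, s.Sublist p ∧ s.length = n ∧ pvXor s = w

-- what an optional table entry must mean: absent = unreachable, present = the least subset size
def MS (p : List Int) (w : Int) (o : Option Int) : Prop :=
  (o = none ∧ ∀ n, ¬ ReachK p w n) ∨
  (∃ m : Nat, o = some (m : Int) ∧ ReachK p w m ∧ ∀ n, ReachK p w n → m ≤ n)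

lemma reach_concat (p : List Int) (t w : Int) (n : Nat) :
    ReachK (p ++ [t]) w n ↔
      ReachK p w n ∨ ∃ m, n = m + 1 ∧ ReachK p (PySem.Int.bxor w t) m := by
  constructor
  · rintro ⟨s, hs, hlen, hx⟩
    obtain ⟨s1, s2, rfl, hs1, hs2⟩ := List.sublist_append_iff.mp hs
    rcases List.sublist_singleton.mp hs2 with rfl | rfl
    · exact Or.inl ⟨s1, hs1, by simpa using hlen, by simpa using hx⟩
    · refine Or.inr ⟨s1.length, by simpa using hlen.symm, s1, hs1, rfl, ?_⟩
      rw [pvXor_append_singleton] at hx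
      rw [← hx, pv_bxor_cancel]
  · rintro (⟨s, hs, hlen, hx⟩ | ⟨m, rfl, s, hs, hlen, hx⟩)
    · exact ⟨s, hs.trans (List.sublist_append_left p [t]), hlen, hx⟩
    · refine ⟨s ++ [t], hs.append (List.Sublist.refl [t]), by simp [hlen], ?_⟩
      rw [pvXor_append_singleton, hx, pv_bxor_cancel]

-- ---- characterization of B's inner fold (dpStep) ----

lemma dpStep_fold_aux (t : Int) (dist : PySem.Dict Int Int) (hnd : dist.keys.Nodup) :
    ∀ (todo done : List (Int × Int)) (cur : PySem.Dict Int Int),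
      dist.items = done ++ todo →
      (∀ w, cur.get? w =
        if PySem.Int.bxor w t ∈ done.map Prod.fst then
          (match dist.get? (PySem.Int.bxor w t) with
            | none => dist.get? w
            | some d => some (min (PySem.Dict.getD dist w (d + 1)) (d + 1)))
        else dist.get? w) →
      ∀ w,
        (todo.foldl
          (fun nxt vd =>
            nxt.insert (PySem.Int.bxor vd.1 t)
              (min (PySem.Dict.getD dist (PySem.Int.bxor vd.1 t) (vd.2 + 1)) (vd.2 + 1)))
          cur).get? w =
        if PySem.Int.bxor w t ∈ (done ++ todo).map Prod.fst then
          (match dist.get? (PySem.Int.bxor w t) with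
            | none => dist.get? w
            | some d => some (min (PySem.Dict.getD dist w (d + 1)) (d + 1)))
        else dist.get? w := by
  intro todo
  induction todo with
  | nil =>
    intro done cur hsplit hinv w
    simp only [List.foldl_nil, List.append_nil]
    exact hinv w
  | cons vd todo ih =>
    intro done cur hsplit hinv w
    obtain ⟨v, d⟩ := vd
    have hmem : (v, d) ∈ dist.items := by rw [hsplit]; simp
    have hvd : dist.get? v = some d := PySem.Dict.get?_of_mem_items dist hmem hnd
    have hsplit' : dist.items = (done ++ [(v, d)]) ++ todo := by
      rw [hsplit, List.append_assoc]; rfl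
    have hinv' : ∀ w, (cur.insert (PySem.Int.bxor v t)
          (min (PySem.Dict.getD dist (PySem.Int.bxor v t) (d + 1)) (d + 1))).get? w =
        if PySem.Int.bxor w t ∈ (done ++ [(v, d)]).map Prod.fst then
          (match dist.get? (PySem.Int.bxor w t) with
            | none => dist.get? w
            | some d => some (min (PySem.Dict.getD dist w (d + 1)) (d + 1)))
        else dist.get? w := by
      intro w
      rw [PySem.Dict.get?_insert]
      by_cases hw : w = PySem.Int.bxor v t
      · subst hw
        have hwt : PySem.Int.bxor (PySem.Int.bxor v t) t = v := pv_bxor_cancel v t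
        rw [if_pos rfl, if_pos (by rw [hwt]; simp), hwt, hvd]
      · have hwt : PySem.Int.bxor w t ≠ v := by
          intro h
          apply hw
          rw [← h, pv_bxor_cancel]
        rw [if_neg hw, hinv w]
        have : (PySem.Int.bxor w t ∈ (done ++ [(v, d)]).map Prod.fst) ↔
            (PySem.Int.bxor w t ∈ done.map Prod.fst) := by simp [hwt]
        by_cases hm : PySem.Int.bxor w t ∈ done.map Prod.fst
        · rw [if_pos hm, if_pos (this.mpr hm)]
        · rw [if_neg hm, if_neg (fun h => hm (this.mp h))]
    have hres := ih (done ++ [(v, d)])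
      (cur.insert (PySem.Int.bxor v t)
        (min (PySem.Dict.getD dist (PySem.Int.bxor v t) (d + 1)) (d + 1)))
      hsplit' hinv' w
    have heq : (done ++ [(v, d)]) ++ todo = done ++ (v, d) :: todo := by simp
    rw [heq] at hres
    exact hres

lemma dpStep_get? (t : Int) (dist : PySem.Dict Int Int) (hnd : dist.keys.Nodup) (w : Int) :
    (dpStep t dist).get? w =
      match dist.get? (PySem.Int.bxor w t) with
      | none => dist.get? w
      | some d => some (min (PySem.Dict.getD dist w (d + 1)) (d + 1)) := by
  have h := dpStep_fold_aux t dist hnd dist.items [] dist (by simp) (by intro w; simp) w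
  cases hg : dist.get? (PySem.Int.bxor w t) with
  | none =>
    have hnm : PySem.Int.bxor w t ∉ List.map Prod.fst ([] ++ dist.items) := by
      rw [List.nil_append]
      exact (PySem.Dict.get?_eq_none_iff_not_mem_keys dist _).mp hg
    unfold dpStep
    rw [h, if_neg hnm]
  | some d =>
    have hm : PySem.Int.bxor w t ∈ List.map Prod.fst ([] ++ dist.items) := by
      rw [List.nil_append]
      exact PySem.Dict.mem_keys_of_mem_items dist (PySem.Dict.mem_items_of_get?_eq_some dist hg)
    unfold dpStep
    rw [h, if_pos hm, hg]

lemma dpStep_nodup (t : Int) (dist : PySem.Dict Int Int) (hnd : dist.keys.Nodup) :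
    (dpStep t dist).keys.Nodup :=
  PySem.Dict.nodup_keys_foldl_insert_key dist.items (fun vd => PySem.Int.bxor vd.1 t)
    (fun nxt vd => min (PySem.Dict.getD dist (PySem.Int.bxor vd.1 t) (vd.2 + 1)) (vd.2 + 1))
    dist hnd

-- dpStep turns a correct table for prefix p into a correct table for p ++ [t]
lemma MS_step (p : List Int) (t : Int) (dist : PySem.Dict Int Int) (hnd : dist.keys.Nodup)
    (hms : ∀ w, MS p w (dist.get? w)) (w : Int) :
    MS (p ++ [t]) w ((dpStep t dist).get? w) := by
  have hchar := dpStep_get? t dist hnd w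
  cases h2 : dist.get? (PySem.Int.bxor w t) with
  | none =>
    rw [h2] at hchar
    have hchar' : (dpStep t dist).get? w = dist.get? w := hchar
    rw [hchar']
    have h2' := hms (PySem.Int.bxor w t)
    rw [h2] at h2'
    have hno2 : ∀ n, ¬ ReachK p (PySem.Int.bxor w t) n := by
      rcases h2' with ⟨_, h⟩ | ⟨m, hm, _⟩
      · exact h
      · cases hm
    rcases hms w with ⟨h1, hno1⟩ | ⟨m, hm, hr, hle⟩
    · rw [h1]
      refine Or.inl ⟨rfl, fun n hn => ?_⟩
      rcases (reach_concat p t w n).mp hn with h | ⟨m, _, h⟩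
      · exact hno1 n h
      · exact hno2 m h
    · rw [hm]
      refine Or.inr ⟨m, rfl, (reach_concat p t w m).mpr (Or.inl hr), fun n hn => ?_⟩
      rcases (reach_concat p t w n).mp hn with h | ⟨m', _, h⟩
      · exact hle n h
      · exact absurd h (hno2 m')
  | some d =>
    rw [h2] at hchar
    have hchar' : (dpStep t dist).get? w
        = some (min (PySem.Dict.getD dist w (d + 1)) (d + 1)) := hchar
    rw [hchar']
    have h2' := hms (PySem.Int.bxor w t)
    rw [h2] at h2'
    rcases h2' with ⟨h, _⟩ | ⟨mb, hmb, hrb, hleb⟩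
    · cases h
    have hd : d = (mb : Int) := by injection hmb
    subst hd
    rw [PySem.Dict.getD_eq_get?_getD]
    rcases hms w with ⟨h1, hno1⟩ | ⟨ma, hma, hra, hlea⟩
    · rw [h1]
      refine Or.inr ⟨mb + 1, by simp [Option.getD], ?_, fun n hn => ?_⟩
      · exact (reach_concat p t w (mb + 1)).mpr (Or.inr ⟨mb, rfl, hrb⟩)
      · rcases (reach_concat p t w n).mp hn with h | ⟨m', rfl, h⟩
        · exact absurd h (hno1 n)
        · exact Nat.succ_le_succ (hleb m' h)
    · rw [hma]
      refine Or.inr ⟨min ma (mb + 1), by simp [Option.getD, Nat.cast_min], ?_, fun n hn => ?_⟩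
      · by_cases hle : ma ≤ mb + 1
        · rw [Nat.min_eq_left hle]
          exact (reach_concat p t w ma).mpr (Or.inl hra)
        · rw [Nat.min_eq_right (by omega)]
          exact (reach_concat p t w (mb + 1)).mpr (Or.inr ⟨mb, rfl, hrb⟩)
      · rcases (reach_concat p t w n).mp hn with h | ⟨m', rfl, h⟩
        · have := hlea n h; omega
        · have := hleb m' h; omega

-- the outer fold over tools keeps the table invariant
lemma dp_fold_inv :
    ∀ (ts p : List Int) (dist : PySem.Dict Int Int),
      dist.keys.Nodup → (∀ w, MS p w (dist.get? w)) →
      (ts.foldl (fun d t => dpStep t d) dist).keys.Nodup ∧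
      ∀ w, MS (p ++ ts) w ((ts.foldl (fun d t => dpStep t d) dist).get? w) := by
  intro ts
  induction ts with
  | nil => intro p dist hnd hms; simpa using ⟨hnd, hms⟩
  | cons t ts ih =>
    intro p dist hnd hms
    have hstep := ih (p ++ [t]) (dpStep t dist) (dpStep_nodup t dist hnd)
      (MS_step p t dist hnd hms)
    simpa [List.append_assoc] using hstep

-- the initial table {0: 0} is correct for the empty prefix
lemma dp_init_nodup : (PySem.Dict.insert (PySem.Dict.empty (κ := Int) (ν := Int)) 0 0).keys.Nodup :=
  PySem.Dict.nodup_keys_insert _ _ _ PySem.Dict.nodup_keys_empty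

lemma dp_init_ms (w : Int) :
    MS [] w ((PySem.Dict.insert (PySem.Dict.empty (κ := Int) (ν := Int)) 0 0).get? w) := by
  rw [PySem.Dict.get?_insert]
  by_cases hw : w = 0
  · subst hw
    rw [if_pos rfl]
    exact Or.inr ⟨0, rfl, ⟨[], List.nil_sublist [], rfl, rfl⟩, fun n _ => Nat.zero_le n⟩
  · rw [if_neg hw, PySem.Dict.get?_empty]
    refine Or.inl ⟨rfl, fun n ⟨s, hs, hlen, hx⟩ => ?_⟩
    rw [List.sublist_nil.mp hs] at hx
    exact hw (by simpa [pvXor] using hx.symm)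

-- ---- A-side analysis: level structure of the BFS ----

-- one node's expansion against all tools, appending fresh values to nf
def pvInner (tools : List Int) (vis : PySem.Set Int) (v : Int) (nf : PySem.Set Int) : PySem.Set Int :=
  tools.foldl
    (fun nf tool =>
      if PySem.Set.contains vis (PySem.Int.bxor v tool) then nf
      else PySem.Set.add nf (PySem.Int.bxor v tool))
    nf

-- expansion of a whole frontier l1, from an arbitrary partial next frontier nf
def pvLvl (tools : List Int) (vis : PySem.Set Int) (l1 nf : PySem.Set Int) : PySem.Set Int :=
  l1.foldl (fun nf v => pvInner tools vis v nf) nf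

lemma pvLvl_nil (tools : List Int) (vis nf : PySem.Set Int) : pvLvl tools vis [] nf = nf := rfl

lemma pvLvl_cons (tools : List Int) (vis : PySem.Set Int) (v : Int) (tl nf : PySem.Set Int) :
    pvLvl tools vis (v :: tl) nf = pvLvl tools vis tl (pvInner tools vis v nf) := rfl

lemma pvInner_cons (t : Int) (ts : List Int) (vis : PySem.Set Int) (v : Int) (nf : PySem.Set Int) :
    pvInner (t :: ts) vis v nf
      = pvInner ts vis v
          (if PySem.Set.contains vis (PySem.Int.bxor v t) then nf
           else PySem.Set.add nf (PySem.Int.bxor v t)) := rfl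

-- bridge: A's fold over tools for one node v, started on a queue of shape q0 ++ nf-tagged and a
-- visited set of shape vis0 ++ nf, computes exactly the pvInner expansion
lemma pvInnerBridge (v c : Int) (vis0 : List Int) :
    ∀ (ts : List Int) (nf : List Int) (q0 : List (Int × Int)),
      ts.foldl
        (fun (st : List (Int × Int) × PySem.Set Int) tool =>
          if PySem.Set.contains st.2 (PySem.Int.bxor v tool) then st
          else (st.1 ++ [(PySem.Int.bxor v tool, c + 1)], PySem.Set.add st.2 (PySem.Int.bxor v tool)))
        (q0 ++ nf.map (fun x => (x, c + 1)), vis0 ++ nf)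
      = (q0 ++ (pvInner ts vis0 v nf).map (fun x => (x, c + 1)), vis0 ++ pvInner ts vis0 v nf) := by
  intro ts
  induction ts with
  | nil => intro nf q0; simp [pvInner]
  | cons t ts ih =>
    intro nf q0
    simp only [List.foldl_cons]
    rw [pvInner_cons]
    by_cases h0 : PySem.Int.bxor v t ∈ vis0
    · have hA : PySem.Set.contains (vis0 ++ nf) (PySem.Int.bxor v t) = true := by
        rw [pv_contains_eq]; simp [h0]
      have hB : PySem.Set.contains vis0 (PySem.Int.bxor v t) = true := by
        rw [pv_contains_eq]; simp [h0]
      rw [if_pos hA, if_pos hB]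
      exact ih nf q0
    · by_cases hn : PySem.Int.bxor v t ∈ nf
      · have hA : PySem.Set.contains (vis0 ++ nf) (PySem.Int.bxor v t) = true := by
          rw [pv_contains_eq]; simp [hn]
        have hB : ¬ (PySem.Set.contains vis0 (PySem.Int.bxor v t) = true) := by
          rw [pv_contains_eq]; simpa using h0
        rw [if_pos hA, if_neg hB, PySem.Set.add_of_mem hn]
        exact ih nf q0
      · have hvn : PySem.Int.bxor v t ∉ vis0 ++ nf := by simp [h0, hn]
        have hA : ¬ (PySem.Set.contains (vis0 ++ nf) (PySem.Int.bxor v t) = true) := by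
          rw [pv_contains_eq]; simpa using hvn
        have hB : ¬ (PySem.Set.contains vis0 (PySem.Int.bxor v t) = true) := by
          rw [pv_contains_eq]; simpa using h0
        rw [if_neg hA, if_neg hB, PySem.Set.add_of_not_mem hvn, PySem.Set.add_of_not_mem hn]
        have := ih (nf ++ [PySem.Int.bxor v t]) q0
        simpa [List.append_assoc] using this

-- A's fold over tools only ever appends to the queue
lemma pvFoldAExtends (v c : Int) :
    ∀ (ts : List Int) (q : List (Int × Int)) (vis : PySem.Set Int),
      ∃ delta vis',
        ts.foldl
          (fun (st : List (Int × Int) × PySem.Set Int) tool =>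
            if PySem.Set.contains st.2 (PySem.Int.bxor v tool) then st
            else (st.1 ++ [(PySem.Int.bxor v tool, c + 1)], PySem.Set.add st.2 (PySem.Int.bxor v tool)))
          (q, vis)
        = (q ++ delta, vis') := by
  intro ts
  induction ts with
  | nil => intro q vis; exact ⟨[], vis, by simp⟩
  | cons t ts ih =>
    intro q vis
    simp only [List.foldl_cons]
    by_cases h : PySem.Set.contains vis (PySem.Int.bxor v t) = true
    · rw [if_pos h]
      exact ih q vis
    · rw [if_neg h]
      obtain ⟨d, vis', hd⟩ :=
        ih (q ++ [(PySem.Int.bxor v t, c + 1)]) (PySem.Set.add vis (PySem.Int.bxor v t))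
      refine ⟨[(PySem.Int.bxor v t, c + 1)] ++ d, vis', ?_⟩
      rw [hd, List.append_assoc]

-- if exp occurs in the depth-c part at the head of the queue, A answers c
lemma pvAFind (exp : Int) (tools : List Int) (c : Int) :
    ∀ (l1 : List Int) (rest : List (Int × Int)) (vis : PySem.Set Int) (f : Nat),
      exp ∈ l1 →
      stepA exp tools (f + l1.length) (l1.map (fun x => (x, c)) ++ rest) vis = some c := by
  intro l1
  induction l1 with
  | nil => intro rest vis f h; cases h
  | cons v tl ih =>
    intro rest vis f h
    rw [List.length_cons, ← Nat.add_assoc]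
    by_cases hv : v = exp
    · simp [stepA, hv]
    · have hm : exp ∈ tl := by
        rcases List.mem_cons.mp h with h' | h'
        · exact absurd h'.symm hv
        · exact h'
      obtain ⟨d, vis', hd⟩ := pvFoldAExtends v c tools (tl.map (fun x => (x, c)) ++ rest) vis
      simp only [stepA, List.map_cons, List.cons_append, hv, if_false]
      rw [hd, List.append_assoc]
      exact ih (rest ++ d) vis' f hm

-- processing one whole BFS level of A equals the pvLvl expansion
lemma pvALevel (exp : Int) (tools : List Int) (c : Int) :
    ∀ (l1 : List Int) (nf vis0 : List Int) (f : Nat),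
      (∀ x ∈ l1, x ≠ exp) →
      stepA exp tools (f + l1.length)
          (l1.map (fun x => (x, c)) ++ nf.map (fun x => (x, c + 1))) (vis0 ++ nf)
        = stepA exp tools f ((pvLvl tools vis0 l1 nf).map (fun x => (x, c + 1)))
            (vis0 ++ pvLvl tools vis0 l1 nf) := by
  intro l1
  induction l1 with
  | nil => intro nf vis0 f _; simp [pvLvl_nil]
  | cons v tl ih =>
    intro nf vis0 f h
    have hv : ¬ (v = exp) := h v (List.mem_cons_self ..)
    rw [List.length_cons, ← Nat.add_assoc]
    simp only [stepA, List.map_cons, List.cons_append, hv, if_false]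
    rw [pvInnerBridge v c vis0 tools nf (tl.map (fun x => (x, c)))]
    rw [pvLvl_cons]
    exact ih (pvInner tools vis0 v nf) vis0 f (fun x hx => h x (List.mem_cons_of_mem v hx))

-- membership facts about the expansion folds
lemma pvInner_mem (vis : PySem.Set Int) (v : Int) :
    ∀ (ts nf : List Int) (x : Int), x ∈ pvInner ts vis v nf →
      x ∈ nf ∨ (x ∉ vis ∧ ∃ t ∈ ts, x = PySem.Int.bxor v t) := by
  intro ts
  induction ts with
  | nil => intro nf x hx; exact Or.inl hx
  | cons t ts ih =>
    intro nf x hx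
    rw [pvInner_cons] at hx
    by_cases h : PySem.Set.contains vis (PySem.Int.bxor v t) = true
    · rw [if_pos h] at hx
      rcases ih nf x hx with h' | ⟨h1, t', ht', h2⟩
      · exact Or.inl h'
      · exact Or.inr ⟨h1, t', List.mem_cons_of_mem t ht', h2⟩
    · rw [if_neg h] at hx
      have hnv : PySem.Int.bxor v t ∉ vis := by
        rw [pv_contains_eq] at h; simpa using h
      rcases ih _ x hx with h' | ⟨h1, t', ht', h2⟩
      · rcases (PySem.Set.mem_add _ _ _).mp h' with h'' | h''
        · exact Or.inl h''
        · exact Or.inr ⟨h'' ▸ hnv, t, List.mem_cons_self .., h''⟩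
      · exact Or.inr ⟨h1, t', List.mem_cons_of_mem t ht', h2⟩

lemma pvInner_mono (vis : PySem.Set Int) (v : Int) :
    ∀ (ts nf : List Int) (x : Int), x ∈ nf → x ∈ pvInner ts vis v nf := by
  intro ts
  induction ts with
  | nil => intro nf x hx; exact hx
  | cons t ts ih =>
    intro nf x hx
    rw [pvInner_cons]
    by_cases h : PySem.Set.contains vis (PySem.Int.bxor v t) = true
    · rw [if_pos h]; exact ih nf x hx
    · rw [if_neg h]
      exact ih _ x ((PySem.Set.mem_add _ _ _).mpr (Or.inl hx))

lemma pvInner_hit (vis : PySem.Set Int) (v : Int) :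
    ∀ (ts nf : List Int) (t : Int), t ∈ ts →
      PySem.Int.bxor v t ∈ vis ∨ PySem.Int.bxor v t ∈ pvInner ts vis v nf := by
  intro ts
  induction ts with
  | nil => intro nf t ht; cases ht
  | cons t0 ts ih =>
    intro nf t ht
    rw [pvInner_cons]
    rcases List.mem_cons.mp ht with rfl | ht'
    · by_cases h : PySem.Set.contains vis (PySem.Int.bxor v t) = true
      · rw [pv_contains_eq] at h; exact Or.inl (by simpa using h)
      · rw [if_neg h]
        exact Or.inr (pvInner_mono vis v ts _ _ ((PySem.Set.mem_add _ _ _).mpr (Or.inr rfl)))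
    · by_cases h : PySem.Set.contains vis (PySem.Int.bxor v t0) = true
      · rw [if_pos h]; exact ih nf t ht'
      · rw [if_neg h]; exact ih _ t ht'

lemma pvInner_nodup (vis : PySem.Set Int) (v : Int) :
    ∀ (ts nf : List Int), nf.Nodup → (pvInner ts vis v nf).Nodup := by
  intro ts
  induction ts with
  | nil => intro nf h; exact h
  | cons t ts ih =>
    intro nf h
    rw [pvInner_cons]
    by_cases hc : PySem.Set.contains vis (PySem.Int.bxor v t) = true
    · rw [if_pos hc]; exact ih nf h
    · rw [if_neg hc]
      exact ih _ (PySem.Set.nodup_add _ _ h)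

lemma pvLvl_mem (tools : List Int) (vis : PySem.Set Int) :
    ∀ (l1 nf : List Int) (x : Int), x ∈ pvLvl tools vis l1 nf →
      x ∈ nf ∨ (x ∉ vis ∧ ∃ v ∈ l1, ∃ t ∈ tools, x = PySem.Int.bxor v t) := by
  intro l1
  induction l1 with
  | nil => intro nf x hx; exact Or.inl hx
  | cons v tl ih =>
    intro nf x hx
    rw [pvLvl_cons] at hx
    rcases ih _ x hx with h' | ⟨h1, v', hv', t, ht, h2⟩
    · rcases pvInner_mem vis v tools nf x h' with h'' | ⟨h1, t, ht, h2⟩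
      · exact Or.inl h''
      · exact Or.inr ⟨h1, v, List.mem_cons_self .., t, ht, h2⟩
    · exact Or.inr ⟨h1, v', List.mem_cons_of_mem v hv', t, ht, h2⟩

lemma pvLvl_mono (tools : List Int) (vis : PySem.Set Int) :
    ∀ (l1 nf : List Int) (x : Int), x ∈ nf → x ∈ pvLvl tools vis l1 nf := by
  intro l1
  induction l1 with
  | nil => intro nf x hx; exact hx
  | cons v tl ih =>
    intro nf x hx
    rw [pvLvl_cons]
    exact ih _ x (pvInner_mono vis v tools nf x hx)

lemma pvLvl_hit (tools : List Int) (vis : PySem.Set Int) :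
    ∀ (l1 nf : List Int) (v t : Int), v ∈ l1 → t ∈ tools →
      PySem.Int.bxor v t ∈ vis ∨ PySem.Int.bxor v t ∈ pvLvl tools vis l1 nf := by
  intro l1
  induction l1 with
  | nil => intro nf v t hv _; cases hv
  | cons v0 tl ih =>
    intro nf v t hv ht
    rw [pvLvl_cons]
    rcases List.mem_cons.mp hv with rfl | hv'
    · rcases pvInner_hit vis v tools nf t ht with h | h
      · exact Or.inl h
      · exact Or.inr (pvLvl_mono tools vis tl _ _ h)
    · exact ih _ v t hv' ht

lemma pvLvl_nodup (tools : List Int) (vis : PySem.Set Int) :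
    ∀ (l1 nf : List Int), nf.Nodup → (pvLvl tools vis l1 nf).Nodup := by
  intro l1
  induction l1 with
  | nil => intro nf h; exact h
  | cons v tl ih => intro nf h; rw [pvLvl_cons]; exact ih _ (pvInner_nodup vis v tools nf h)

lemma pvUpdateAppend :
    ∀ (nf vis0 : List Int), (∀ x ∈ nf, x ∉ vis0) → nf.Nodup →
      PySem.Set.update vis0 nf = vis0 ++ nf := by
  intro nf
  induction nf with
  | nil => intro vis0 _ _; simp [PySem.Set.update]
  | cons x tl ih =>
    intro vis0 hfr hnd
    have hx : x ∉ vis0 := hfr x (List.mem_cons_self ..)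
    have h1 : PySem.Set.update vis0 (x :: tl) = PySem.Set.update (vis0 ++ [x]) tl := by
      simp [PySem.Set.update, PySem.Set.add_of_not_mem hx]
    rw [h1, ih (vis0 ++ [x]) ?_ (List.nodup_cons.mp hnd).2]
    · simp
    · intro y hy
      simp only [List.mem_append, List.mem_singleton]
      rintro (h | rfl)
      · exact hfr y (List.mem_cons_of_mem x hy) h
      · exact (List.nodup_cons.mp hnd).1 hy

-- the BFS levels: pvLevels j = (visited after j levels, level-j frontier)
def pvLevels (tools : List Int) : Nat → PySem.Set Int × PySem.Set Int
  | 0 => ([0], [0])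
  | j + 1 =>
    let p := pvLevels tools j
    let nf := pvLvl tools p.1 p.2 []
    (PySem.Set.update p.1 nf, nf)

def pvVis (tools : List Int) (j : Nat) : PySem.Set Int := (pvLevels tools j).1
def pvFront (tools : List Int) (j : Nat) : PySem.Set Int := (pvLevels tools j).2

lemma pvFront_succ (tools : List Int) (j : Nat) :
    pvFront tools (j + 1) = pvLvl tools (pvVis tools j) (pvFront tools j) [] := rfl

lemma pvVis_succ_raw (tools : List Int) (j : Nat) :
    pvVis tools (j + 1) = PySem.Set.update (pvVis tools j) (pvFront tools (j + 1)) := rfl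

lemma pvFront_fresh (tools : List Int) (j : Nat) :
    ∀ x ∈ pvFront tools (j + 1), x ∉ pvVis tools j := by
  intro x hx
  rw [pvFront_succ] at hx
  rcases pvLvl_mem tools (pvVis tools j) (pvFront tools j) [] x hx with h | ⟨h, _⟩
  · cases h
  · exact h

lemma pvFront_nodup (tools : List Int) (j : Nat) : (pvFront tools (j + 1)).Nodup := by
  rw [pvFront_succ]
  exact pvLvl_nodup tools (pvVis tools j) (pvFront tools j) [] List.nodup_nil

lemma pvVis_succ (tools : List Int) (j : Nat) :
    pvVis tools (j + 1) = pvVis tools j ++ pvFront tools (j + 1) := by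
  rw [pvVis_succ_raw]
  exact pvUpdateAppend _ _ (pvFront_fresh tools j) (pvFront_nodup tools j)

lemma pvFront_sub_vis (tools : List Int) (j : Nat) :
    ∀ x ∈ pvFront tools j, x ∈ pvVis tools j := by
  cases j with
  | zero => intro x hx; exact hx
  | succ j => intro x hx; rw [pvVis_succ]; exact List.mem_append.mpr (Or.inr hx)

lemma pvVis_nodup (tools : List Int) : ∀ j, (pvVis tools j).Nodup := by
  intro j
  induction j with
  | zero => simp [pvVis, pvLevels]
  | succ j ih =>
    rw [pvVis_succ]
    exact ih.append (pvFront_nodup tools j) (fun a ha hb => pvFront_fresh tools j a hb ha)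

lemma pvVis_mono (tools : List Int) {x : Int} :
    ∀ {j m : Nat}, j ≤ m → x ∈ pvVis tools j → x ∈ pvVis tools m := by
  intro j m hjm hx
  induction m with
  | zero => rwa [Nat.le_zero.mp hjm] at hx
  | succ m ih =>
    rcases Nat.lt_or_ge j (m + 1) with h | h
    · rw [pvVis_succ]
      exact List.mem_append.mpr (Or.inl (ih (Nat.lt_succ_iff.mp h)))
    · rwa [Nat.le_antisymm hjm h] at hx

lemma pvMemVisFront (tools : List Int) {x : Int} :
    ∀ {m : Nat}, x ∈ pvVis tools m → ∃ i, i ≤ m ∧ x ∈ pvFront tools i := by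
  intro m
  induction m with
  | zero => intro hx; exact ⟨0, le_refl 0, hx⟩
  | succ m ih =>
    intro hx
    rw [pvVis_succ] at hx
    rcases List.mem_append.mp hx with h | h
    · obtain ⟨i, hi, hf⟩ := ih h
      exact ⟨i, Nat.le_succ_of_le hi, hf⟩
    · exact ⟨m + 1, le_refl _, h⟩

lemma pvVis_closure (tools : List Int) {v t : Int} {m : Nat}
    (hv : v ∈ pvVis tools m) (ht : t ∈ tools) : PySem.Int.bxor v t ∈ pvVis tools (m + 1) := by
  obtain ⟨i, hi, hf⟩ := pvMemVisFront tools hv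
  have hstep : PySem.Int.bxor v t ∈ pvVis tools (i + 1) := by
    rw [pvVis_succ]
    rcases pvLvl_hit tools (pvVis tools i) (pvFront tools i) [] v t hf ht with h | h
    · exact List.mem_append.mpr (Or.inl h)
    · exact List.mem_append.mpr (Or.inr (by rw [pvFront_succ]; exact h))
  exact pvVis_mono tools (Nat.succ_le_succ hi) hstep

-- every XOR of a sublist of tools is visited within its length many levels
lemma pvReachLemma (tools : List Int) :
    ∀ s : List Int, s.Sublist tools → pvXor s ∈ pvVis tools s.length := by
  intro s
  induction s using List.reverseRecOn with
  | nil => intro _; simp [pvXor, pvVis, pvLevels]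
  | append_singleton s t ih =>
    intro hsub
    have hs : s.Sublist tools := (List.sublist_append_left s [t]).trans hsub
    have ht : t ∈ tools := hsub.mem (by simp)
    have := pvVis_closure tools (ih hs) ht
    simpa [pvXor_append_singleton] using this

-- XOR-cancellation toggle: adjoining one more tool to a sublist-XOR stays a sublist-XOR
lemma pvToggle :
    ∀ (tools s : List Int) (t : Int), s.Sublist tools → t ∈ tools →
      ∃ s', s'.Sublist tools ∧ s'.length ≤ s.length + 1 ∧
        pvXor s' = PySem.Int.bxor (pvXor s) t := by
  intro tools
  induction tools with
  | nil => intro s t _ ht; cases ht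
  | cons t0 ts ih =>
    intro s t hs ht
    rcases List.sublist_cons_iff.mp hs with hs' | ⟨r, rfl, hr⟩
    · rcases List.mem_cons.mp ht with heq | ht'
      · refine ⟨t0 :: s, List.Sublist.cons₂ t0 hs', by simp, ?_⟩
        rw [pvXor_cons, heq, PySem.Int.bxor_comm]
      · obtain ⟨s', h1, h2, h3⟩ := ih s t hs' ht'
        exact ⟨s', h1.cons t0, h2, h3⟩
    · rcases List.mem_cons.mp ht with heq | ht'
      · refine ⟨r, List.Sublist.cons t0 hr, by simp only [List.length_cons]; omega, ?_⟩
        rw [pvXor_cons, heq, PySem.Int.bxor_comm t0 (pvXor r), pv_bxor_cancel]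
      · obtain ⟨s', h1, h2, h3⟩ := ih r t hr ht'
        refine ⟨t0 :: s', List.Sublist.cons₂ t0 h1, by simp only [List.length_cons]; omega, ?_⟩
        rw [pvXor_cons, pvXor_cons, h3, pv_bxor_assoc]

-- every visited value at level n is a sublist-XOR of size ≤ n
lemma pvVisToSub (tools : List Int) :
    ∀ (n : Nat) (x : Int), x ∈ pvVis tools n →
      ∃ s, s.Sublist tools ∧ s.length ≤ n ∧ pvXor s = x := by
  intro n
  induction n with
  | zero =>
    intro x hx
    have hx0 : x = 0 := by simpa [pvVis, pvLevels] using hx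
    exact ⟨[], List.nil_sublist tools, by simp, by simp [pvXor, hx0]⟩
  | succ n ih =>
    intro x hx
    rw [pvVis_succ] at hx
    rcases List.mem_append.mp hx with h | h
    · obtain ⟨s, h1, h2, h3⟩ := ih x h
      exact ⟨s, h1, Nat.le_succ_of_le h2, h3⟩
    · rw [pvFront_succ] at h
      rcases pvLvl_mem tools (pvVis tools n) (pvFront tools n) [] x h with h' | ⟨_, v, hv, t, ht, rfl⟩
      · cases h'
      · obtain ⟨s, h1, h2, h3⟩ := ih v (pvFront_sub_vis tools n v hv)
        obtain ⟨s', h1', h2', h3'⟩ := pvToggle tools s t h1 ht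
        exact ⟨s', h1', by omega, by rw [h3', h3]⟩

-- xorSpan lemmas (fuel bound for A)
lemma pvSpanAccMono :
    ∀ (ts : List Int) (acc : Finset Int),
      acc ⊆ ts.foldl (fun acc t => acc ∪ acc.image (fun x => PySem.Int.bxor x t)) acc := by
  intro ts
  induction ts with
  | nil => intro acc; simp
  | cons t ts ih =>
    intro acc
    simp only [List.foldl_cons]
    exact Finset.subset_union_left.trans (ih _)

def pvClosed (acc : Finset Int) (t : Int) : Prop := ∀ x ∈ acc, PySem.Int.bxor x t ∈ acc

lemma pvStepPres (acc : Finset Int) (s t : Int) (h : pvClosed acc s) :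
    pvClosed (acc ∪ acc.image (fun x => PySem.Int.bxor x t)) s := by
  intro x hx
  rcases Finset.mem_union.mp hx with hx | hx
  · exact Finset.mem_union.mpr (Or.inl (h x hx))
  · obtain ⟨y, hy, rfl⟩ := Finset.mem_image.mp hx
    refine Finset.mem_union.mpr (Or.inr (Finset.mem_image.mpr ⟨PySem.Int.bxor y s, h y hy, ?_⟩))
    rw [pv_bxor_right_comm]

lemma pvStepNew (acc : Finset Int) (t : Int) :
    pvClosed (acc ∪ acc.image (fun x => PySem.Int.bxor x t)) t := by
  intro x hx
  rcases Finset.mem_union.mp hx with hx | hx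
  · exact Finset.mem_union.mpr (Or.inr (Finset.mem_image.mpr ⟨x, hx, rfl⟩))
  · obtain ⟨y, hy, rfl⟩ := Finset.mem_image.mp hx
    rw [pv_bxor_cancel]
    exact Finset.mem_union.mpr (Or.inl hy)

lemma pvSpanFoldClosed :
    ∀ (ts : List Int) (acc : Finset Int) (t : Int), (t ∈ ts ∨ pvClosed acc t) →
      pvClosed (ts.foldl (fun acc t => acc ∪ acc.image (fun x => PySem.Int.bxor x t)) acc) t := by
  intro ts
  induction ts with
  | nil =>
    intro acc t h
    rcases h with h | h
    · cases h
    · exact h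
  | cons t0 ts ih =>
    intro acc t h
    simp only [List.foldl_cons]
    rcases h with h | h
    · rcases List.mem_cons.mp h with rfl | h'
      · exact ih _ t (Or.inr (pvStepNew acc t))
      · exact ih _ t (Or.inl h')
    · exact ih _ t (Or.inr (pvStepPres acc t t0 h))

lemma pvSpanClosed (tools : List Int) {t : Int} (ht : t ∈ tools) {x : Int}
    (hx : x ∈ xorSpan tools) : PySem.Int.bxor x t ∈ xorSpan tools :=
  pvSpanFoldClosed tools {0} t (Or.inl ht) x hx

lemma pvSpanFoldCard :
    ∀ (ts : List Int) (acc : Finset Int),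
      (ts.foldl (fun acc t => acc ∪ acc.image (fun x => PySem.Int.bxor x t)) acc).card
        ≤ acc.card * 2 ^ ts.length := by
  intro ts
  induction ts with
  | nil => intro acc; simp
  | cons t ts ih =>
    intro acc
    simp only [List.foldl_cons, List.length_cons]
    calc (ts.foldl (fun acc t => acc ∪ acc.image (fun x => PySem.Int.bxor x t))
            (acc ∪ acc.image (fun x => PySem.Int.bxor x t))).card
        ≤ (acc ∪ acc.image (fun x => PySem.Int.bxor x t)).card * 2 ^ ts.length := ih _
      _ ≤ (acc.card + acc.card) * 2 ^ ts.length := by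
          have h1 : (acc ∪ acc.image (fun x => PySem.Int.bxor x t)).card
              ≤ acc.card + (acc.image (fun x => PySem.Int.bxor x t)).card :=
            Finset.card_union_le _ _
          have h2 : (acc.image (fun x => PySem.Int.bxor x t)).card ≤ acc.card :=
            Finset.card_image_le
          exact Nat.mul_le_mul_right _ (by omega)
      _ = acc.card * 2 ^ (ts.length + 1) := by ring

lemma pvSpanCard (tools : List Int) : (xorSpan tools).card ≤ 2 ^ tools.length := by
  have := pvSpanFoldCard tools {0}
  simpa [xorSpan] using this

lemma pvSpanFoldSub :
    ∀ (ts done : List Int) (acc : Finset Int),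
      (∀ x ∈ acc, ∃ s : List Int, s.Sublist done ∧ pvXor s = x) →
      ∀ x ∈ ts.foldl (fun acc t => acc ∪ acc.image (fun x => PySem.Int.bxor x t)) acc,
        ∃ s : List Int, s.Sublist (done ++ ts) ∧ pvXor s = x := by
  intro ts
  induction ts with
  | nil => intro done acc h x hx; simpa using h x hx
  | cons t ts ih =>
    intro done acc h x hx
    simp only [List.foldl_cons] at hx
    have hacc : ∀ y ∈ acc ∪ acc.image (fun x => PySem.Int.bxor x t),
        ∃ s : List Int, s.Sublist (done ++ [t]) ∧ pvXor s = y := by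
      intro y hy
      rcases Finset.mem_union.mp hy with hy | hy
      · obtain ⟨s, hs, hf⟩ := h y hy
        exact ⟨s, hs.trans (List.sublist_append_left done [t]), hf⟩
      · obtain ⟨z, hz, rfl⟩ := Finset.mem_image.mp hy
        obtain ⟨s, hs, hf⟩ := h z hz
        exact ⟨s ++ [t], hs.append (List.Sublist.refl [t]), by rw [pvXor_append_singleton, hf]⟩
    have := ih (done ++ [t]) _ hacc x hx
    simpa [List.append_assoc] using this

lemma pvSpanToSublist (tools : List Int) {exp : Int} (h : exp ∈ xorSpan tools) :
    ∃ s : List Int, s.Sublist tools ∧ pvXor s = exp := by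
  have := pvSpanFoldSub tools [] {0} ?_ exp h
  · simpa using this
  · intro x hx
    rw [Finset.mem_singleton] at hx
    exact ⟨[], List.nil_sublist [], by simp [pvXor, hx.symm]⟩

lemma pvVisSubSpan (tools : List Int) : ∀ j, ∀ x ∈ pvVis tools j, x ∈ xorSpan tools := by
  intro j
  induction j with
  | zero =>
    intro x hx
    have : x = 0 := by simpa [pvVis, pvLevels] using hx
    exact this ▸ pvSpanAccMono tools {0} (Finset.mem_singleton_self 0)
  | succ j ih =>
    intro x hx
    rw [pvVis_succ] at hx
    rcases List.mem_append.mp hx with h | h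
    · exact ih x h
    · rw [pvFront_succ] at h
      rcases pvLvl_mem tools (pvVis tools j) (pvFront tools j) [] x h with h' | ⟨_, v, hv, t, ht, rfl⟩
      · cases h'
      · exact pvSpanClosed tools ht (ih v (pvFront_sub_vis tools j v hv))

-- total size of levels j..j+n
def pvSumLen (tools : List Int) (j n : Nat) : Nat :=
  ((List.range (n + 1)).map (fun i => (pvFront tools (j + i)).length)).sum

lemma pvSumLen_zero (tools : List Int) (j : Nat) :
    pvSumLen tools j 0 = (pvFront tools j).length := by simp [pvSumLen]

lemma pvSumLen_shift (tools : List Int) (j n : Nat) :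
    pvSumLen tools j (n + 1) = (pvFront tools j).length + pvSumLen tools (j + 1) n := by
  unfold pvSumLen
  rw [List.range_succ_eq_map]
  simp only [List.map_cons, List.sum_cons, List.map_map, Function.comp_def, Nat.add_zero,
    Nat.succ_eq_add_one]
  congr 1
  apply congrArg
  apply List.map_congr_left
  intro i _
  rw [show j + (i + 1) = j + 1 + i from by omega]

lemma pvSumLen_right (tools : List Int) (j n : Nat) :
    pvSumLen tools j (n + 1) = pvSumLen tools j n + (pvFront tools (j + (n + 1))).length := by
  simp [pvSumLen, List.range_succ]
  ring

lemma pvVisLen (tools : List Int) : ∀ n, (pvVis tools n).length = pvSumLen tools 0 n := by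
  intro n
  induction n with
  | zero => rw [pvSumLen_zero]; rfl
  | succ n ih =>
    rw [pvVis_succ, List.length_append, ih, pvSumLen_right]
    simp

-- A reaches the answer: starting at level j, with exp first appearing n levels later
lemma pvAReach (exp : Int) (tools : List Int) :
    ∀ (n j f : Nat),
      exp ∈ pvFront tools (j + n) → (∀ i, i < n → exp ∉ pvFront tools (j + i)) →
      stepA exp tools (f + pvSumLen tools j n)
          ((pvFront tools j).map (fun x => (x, (j : Int)))) (pvVis tools j)
        = some ((j + n : Nat) : Int) := by
  intro n
  induction n with
  | zero =>
    intro j f hmem _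
    rw [pvSumLen_zero]
    have := pvAFind exp tools (j : Int) (pvFront tools j) [] (pvVis tools j) f (by simpa using hmem)
    simpa using this
  | succ n ih =>
    intro j f hmem hnot
    have h0 : exp ∉ pvFront tools j := by simpa using hnot 0 (Nat.succ_pos n)
    have hne : ∀ x ∈ pvFront tools j, x ≠ exp := fun x hx => by rintro rfl; exact h0 hx
    have hfuel : f + pvSumLen tools j (n + 1)
        = (f + pvSumLen tools (j + 1) n) + (pvFront tools j).length := by
      rw [pvSumLen_shift]; omega
    rw [hfuel]
    have hlev := pvALevel exp tools (j : Int) (pvFront tools j) [] (pvVis tools j)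
      (f + pvSumLen tools (j + 1) n) hne
    simp only [List.map_nil, List.append_nil] at hlev
    rw [hlev, ← pvFront_succ, ← pvVis_succ]
    have hcast : ((j : Int) + 1) = (((j + 1 : Nat)) : Int) := by push_cast; ring
    rw [hcast]
    have hmem' : exp ∈ pvFront tools ((j + 1) + n) := by
      rwa [show j + (n + 1) = (j + 1) + n from by omega] at hmem
    have hnot' : ∀ i, i < n → exp ∉ pvFront tools ((j + 1) + i) := by
      intro i hi
      have := hnot (i + 1) (by omega)
      rwa [show j + (i + 1) = (j + 1) + i from by omega] at this
    rw [ih (j + 1) f hmem' hnot']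
    congr 1
    omega

-- ===== VERDICT (by name: the statement is the Claim_ definition above) =====
theorem bfs_on_tools_spec : Claim_equal_bfs_on_tools := by
  intro exp tools _ hpre
  unfold Spec_bfs_on_tools
  obtain ⟨s0, hsub0, hx0⟩ := pvSpanToSublist tools hpre
  -- the first BFS level containing exp
  have hreach0 := pvReachLemma tools s0 hsub0
  rw [hx0] at hreach0
  obtain ⟨i0, hi0, hf0⟩ := pvMemVisFront tools hreach0
  have hfex : ∃ j, exp ∈ pvFront tools j := ⟨i0, hf0⟩
  -- A's value
  have hc0 : exp ∈ pvFront tools (0 + Nat.find hfex) := by simpa using Nat.find_spec hfex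
  have hmin : ∀ k, k < Nat.find hfex → exp ∉ pvFront tools (0 + k) := by
    intro k hk
    simpa using Nat.find_min hfex hk
  have hsum : pvSumLen tools 0 (Nat.find hfex) ≤ 2 ^ tools.length := by
    rw [← pvVisLen]
    calc (pvVis tools (Nat.find hfex)).length
        = (pvVis tools (Nat.find hfex)).toFinset.card := by
          rw [List.toFinset_card_of_nodup (pvVis_nodup tools _)]
      _ ≤ (xorSpan tools).card := Finset.card_le_card (fun x hx =>
            pvVisSubSpan tools _ x (List.mem_toFinset.mp hx))
      _ ≤ 2 ^ tools.length := pvSpanCard tools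
  have hA := pvAReach exp tools (Nat.find hfex) 0
    (2 ^ tools.length + 1 - pvSumLen tools 0 (Nat.find hfex)) hc0 hmin
  rw [Nat.sub_add_cancel (le_trans hsum (Nat.le_succ _))] at hA
  have hA' : stepA exp tools (2 ^ tools.length + 1)
      ((pvFront tools 0).map (fun x => (x, (0 : Int)))) (pvVis tools 0)
      = some ((Nat.find hfex : Nat) : Int) := by
    simpa using hA
  -- B's value
  obtain ⟨-, hms⟩ := dp_fold_inv tools []
    (PySem.Dict.insert PySem.Dict.empty 0 0) dp_init_nodup dp_init_ms
  have hmsexp := hms exp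
  rw [List.nil_append] at hmsexp
  rcases hmsexp with ⟨hnone, hno⟩ | ⟨m, hm, hr, hle⟩
  · exact absurd (⟨s0, hsub0, rfl, hx0⟩ : ReachK tools exp s0.length) (hno _)
  · -- the table's minimum equals the first BFS level
    have hLAle : Nat.find hfex ≤ m := by
      obtain ⟨s1, hs1, hlen1, hx1⟩ := hr
      have hv : exp ∈ pvVis tools m := by
        have := pvReachLemma tools s1 hs1
        rwa [hx1, hlen1] at this
      obtain ⟨i, hi, hf⟩ := pvMemVisFront tools hv
      exact le_trans (Nat.find_min' hfex hf) hi
    have hmle : m ≤ Nat.find hfex := by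
      have hv : exp ∈ pvVis tools (Nat.find hfex) :=
        pvFront_sub_vis tools _ _ (Nat.find_spec hfex)
      obtain ⟨s, hs, hlen, hx⟩ := pvVisToSub tools _ _ hv
      exact le_trans (hle _ ⟨s, hs, rfl, hx⟩) hlen
    have hmL : m = Nat.find hfex := Nat.le_antisymm hmle hLAle
    unfold bfs_on_tools bfs_on_tools_alt
    rw [show PySem.Set.add PySem.Set.empty (0 : Int) = pvVis tools 0 from rfl]
    rw [show ([((0 : Int), (0 : Int))] : List (Int × Int))
          = (pvFront tools 0).map (fun x => (x, (0 : Int))) from rfl]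
    rw [hA', hm, hmL]
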